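-- pv_equiv track=rewrite | github.com/back0319/jerumi | backend/tests/test_color_analysis.py | make_pixels
-- ===== SOURCE A (Python) =====
-- def make_pixels(rgb: list[int], count: int, jitter: int = 0) -> list[list[float]]:
--     pixels: list[list[float]] = []
--     for index in range(count):
--         offset = (index % (jitter * 2 + 1)) - jitter if jitter else 0
--         pixels.append(
--             [
--                 max(0, min(255, rgb[0] + offset)),
--                 max(0, min(255, rgb[1] + offset)),
--                 max(0, min(255, rgb[2] + offset)),
--             ]
--         )
--     return pixels
-- ===== SOURCE B (Python) =====
-- def make_pixels(rgb: list[int], count: int, jitter: int = 0) -> list[list[float]]: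
--     # Offsets repeat, so cache the clamped row per offset and emit fresh copies.
--     period = 2 * jitter + 1
--     rows: dict[int, list[int]] = {}
--     pixels: list[list[float]] = []
--     for index in range(count):
--         offset = index % period - jitter
--         if offset not in rows:
--             rows[offset] = [max(0, min(255, rgb[c] + offset)) for c in range(3)]
--         pixels.append(list(rows[offset]))
--     return pixels
-- ===== Notes on version B (the rewrite author's own statement) =====
-- stated objective: alternative
-- what changed: B memoizes the clamped row per offset value in a dict built lazily during one pass and appends fresh copies, instead of recomputing the three clamps on every iteration; Pre_ excludes only count > 0 with fewer than 3 channels, where A raises IndexError.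
import Mathlib
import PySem

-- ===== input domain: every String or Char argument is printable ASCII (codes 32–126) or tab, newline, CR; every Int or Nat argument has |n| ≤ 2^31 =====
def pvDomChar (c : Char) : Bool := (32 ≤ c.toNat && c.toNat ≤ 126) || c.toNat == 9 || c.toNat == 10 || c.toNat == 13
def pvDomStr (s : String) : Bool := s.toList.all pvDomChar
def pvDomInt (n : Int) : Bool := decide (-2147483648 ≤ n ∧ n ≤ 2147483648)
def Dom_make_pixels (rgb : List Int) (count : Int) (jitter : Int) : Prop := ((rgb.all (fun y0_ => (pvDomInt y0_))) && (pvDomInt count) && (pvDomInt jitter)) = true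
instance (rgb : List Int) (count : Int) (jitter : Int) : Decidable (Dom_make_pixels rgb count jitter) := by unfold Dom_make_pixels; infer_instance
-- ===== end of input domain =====

-- B memoizes the clamped row per offset value in a dict and appends fresh copies,
-- instead of recomputing the clamps each iteration (alternative decomposition, not faster).


-- ===== PORT A =====
-- rgb[k] is ported with pyGetD (default 0): exact on Pre_, where Python's indexing cannot raise.
def make_pixels (rgb : List Int) (count : Int) (jitter : Int) : List (List Int) :=
  (PySem.List.pyRange 0 count 1).foldl
    (fun pixels index =>
      let offset : Int :=
        if jitter ≠ 0 then PySem.Int.mod index (jitter * 2 + 1) - jitter else 0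
      pixels ++
        [[max 0 (min 255 (PySem.List.pyGetD rgb 0 0 + offset)),
          max 0 (min 255 (PySem.List.pyGetD rgb 1 0 + offset)),
          max 0 (min 255 (PySem.List.pyGetD rgb 2 0 + offset))]])
    []

-- ===== PORT B =====
def make_pixels_alt (rgb : List Int) (count : Int) (jitter : Int) : List (List Int) :=
  let period : Int := 2 * jitter + 1
  let st : PySem.Dict Int (List Int) × List (List Int) :=
    (PySem.List.pyRange 0 count 1).foldl
      (fun st index =>
        let offset : Int := PySem.Int.mod index period - jitter
        let rows :=
          if st.1.contains offset then st.1
          else st.1.insert offset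
            ((PySem.List.pyRange 0 3 1).map
              (fun c => max 0 (min 255 (PySem.List.pyGetD rgb c 0 + offset))))
        (rows, st.2 ++ [rows.getD offset []]))
      (PySem.Dict.empty, [])
  st.2

-- ===== PRECONDITION & SPEC =====
-- Pre_ excludes exactly the inputs where Python A raises IndexError: count > 0 with fewer than 3 channels.
def Pre_make_pixels (rgb : List Int) (count : Int) (jitter : Int) : Prop :=
  count ≤ 0 ∨ 3 ≤ rgb.length
instance (rgb : List Int) (count : Int) (jitter : Int) : Decidable (Pre_make_pixels rgb count jitter) := by unfold Pre_make_pixels; infer_instance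
def pvWitness_make_pixels : List Int × Int × Int := ([100, 150, 200], 5, 2)
def Spec_make_pixels (rgb : List Int) (count : Int) (jitter : Int) (out : List (List Int)) : Prop := out = make_pixels_alt rgb count jitter
instance (rgb : List Int) (count : Int) (jitter : Int) (out : List (List Int)) : Decidable (Spec_make_pixels rgb count jitter out) := by unfold Spec_make_pixels; infer_instance

-- ===== CLAIM (what is proved, stated in full; the proofs are below) =====
def Claim_equal_make_pixels : Prop := ∀ (rgb : List Int) (count : Int) (jitter : Int), Dom_make_pixels rgb count jitter → Pre_make_pixels rgb count jitter → Spec_make_pixels rgb count jitter (make_pixels rgb count jitter)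

-- ===== LEMMAS AND PROOFS =====

-- the clamped row for a given offset
def pvRow (rgb : List Int) (offset : Int) : List Int :=
  (PySem.List.pyRange 0 3 1).map
    (fun c => max 0 (min 255 (PySem.List.pyGetD rgb c 0 + offset)))

-- B's memoizing fold emits exactly the row for each index's offset: induction with the
-- invariant that every cached entry is the row for its key.
theorem pv_B_loop (rgb : List Int) (jitter : Int) (l : List Int)
    (d : PySem.Dict Int (List Int)) (acc : List (List Int))
    (off : Int → Int)
    (hinv : ∀ k v, d.get? k = some v → v = pvRow rgb k) :
    (l.foldl
      (fun (st : PySem.Dict Int (List Int) × List (List Int)) index =>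
        let offset : Int := off index
        let rows :=
          if st.1.contains offset then st.1
          else st.1.insert offset (pvRow rgb offset)
        (rows, st.2 ++ [rows.getD offset []]))
      (d, acc)).2 = acc ++ l.map (fun index => pvRow rgb (off index)) := by
  induction l generalizing d acc with
  | nil => simp
  | cons x xs ih =>
    simp only [List.foldl_cons, List.map_cons]
    by_cases hc : d.contains (off x)
    · have hsome : ∃ v, d.get? (off x) = some v := by
        have := PySem.Dict.contains_eq_isSome_get? (d := d) (k := off x)
        rw [hc] at this
        exact Option.isSome_iff_exists.mp this.symm
      obtain ⟨v, hv⟩ := hsome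
      have hval : d.getD (off x) [] = pvRow rgb (off x) := by
        rw [PySem.Dict.getD_eq_get?_getD, hv]; exact hinv _ _ hv
      simp only [hc, if_true]
      rw [ih d _ hinv, hval]
      simp
    · simp only [hc, Bool.false_eq_true, if_false]
      have hval : (d.insert (off x) (pvRow rgb (off x))).getD (off x) [] = pvRow rgb (off x) := by
        simp [PySem.Dict.getD_insert_self]
      rw [ih _ _ ?_, hval]
      · simp
      · intro k v hv
        by_cases hk : k = off x
        · subst hk
          rw [PySem.Dict.get?_insert_self] at hv
          exact (Option.some_inj.mp hv).symm
        · rw [PySem.Dict.get?_insert_of_ne (hne := hk)] at hv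
          exact hinv _ _ hv

-- A, rephrased as a map over its index range
theorem pv_A_eq_map (rgb : List Int) (count jitter : Int) :
    make_pixels rgb count jitter =
      (PySem.List.pyRange 0 count 1).map (fun index =>
        let offset : Int :=
          if jitter ≠ 0 then PySem.Int.mod index (jitter * 2 + 1) - jitter else 0
        [max 0 (min 255 (PySem.List.pyGetD rgb 0 0 + offset)),
         max 0 (min 255 (PySem.List.pyGetD rgb 1 0 + offset)),
         max 0 (min 255 (PySem.List.pyGetD rgb 2 0 + offset))]) := by
  unfold make_pixels
  rw [PySem.List.foldl_append_singleton_eq_map]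
  simp

theorem pv_row_explicit (rgb : List Int) (offset : Int) :
    pvRow rgb offset =
      [max 0 (min 255 (PySem.List.pyGetD rgb 0 0 + offset)),
       max 0 (min 255 (PySem.List.pyGetD rgb 1 0 + offset)),
       max 0 (min 255 (PySem.List.pyGetD rgb 2 0 + offset))] := by
  have h3 : PySem.List.pyRange 0 3 1 = [0, 1, 2] := by decide
  simp [pvRow, h3]

-- make_pixels_alt, with its lets unfolded and the row abbreviated by pvRow (definitional)
theorem pv_alt_def (rgb : List Int) (count jitter : Int) :
    make_pixels_alt rgb count jitter =
      ((PySem.List.pyRange 0 count 1).foldl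
        (fun (st : PySem.Dict Int (List Int) × List (List Int)) index =>
          let offset : Int := (fun i => PySem.Int.mod i (2 * jitter + 1) - jitter) index
          let rows :=
            if st.1.contains offset then st.1
            else st.1.insert offset (pvRow rgb offset)
          (rows, st.2 ++ [rows.getD offset []]))
        (PySem.Dict.empty, [])).2 := rfl

theorem make_pixels_eq (rgb : List Int) (count jitter : Int) :
    make_pixels rgb count jitter = make_pixels_alt rgb count jitter := by
  rw [pv_A_eq_map, pv_alt_def]
  rw [pv_B_loop rgb jitter _ _ _ (fun i => PySem.Int.mod i (2 * jitter + 1) - jitter)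
      (by intro k v hv; rw [PySem.Dict.get?_empty] at hv; exact absurd hv (by simp))]
  simp only [List.nil_append]
  apply List.map_congr_left
  intro index _
  by_cases hj : jitter = 0
  · subst hj
    have h1 : PySem.Int.mod index 1 = 0 := by
      have := PySem.Int.mod_nonneg index (b := 1) (by norm_num)
      have := PySem.Int.mod_lt index (b := 1) (by norm_num)
      omega
    simp only [if_neg (by simp : ¬ ((0:Int) ≠ 0))]
    norm_num [h1, pv_row_explicit]
  · have heq : (2 * jitter + 1 : Int) = jitter * 2 + 1 := by ring
    simp only [if_pos hj, heq, pv_row_explicit]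

-- ===== VERDICT (by name: the statement is the Claim_ definition above) =====
theorem make_pixels_spec : Claim_equal_make_pixels := by
  intro rgb count jitter _ _
  exact make_pixels_eq rgb count jitter
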